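-- pv_equiv track=rewrite | github.com/spc-ezual/terminalv0 | exo sujet bac/finit/exo sujet 1 marcus.py | recherche
-- ===== SOURCE A (Python) =====
-- def recherche(liste ,element):
--     nb=liste.count(element)
--     if nb < 1:
--         return len (liste)
--     elif nb==1:
--         return liste.index(element)
--     else:
--         indice=-1
--         while liste[indice]!=element:
--             indice-=1
--         return len(liste)+indice
-- ===== SOURCE B (Python) =====
-- def recherche(liste, element):
--     count = 0
--     first = -1
--     last = -1
--     for i, x in enumerate(liste):
--         if x == element:
--             count += 1
--             if first < 0:
--                 first = i
--             last = i
--     if count == 0: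
--         return len(liste)
--     if count == 1:
--         return first
--     return last
-- ===== Notes on version B (the rewrite author's own statement) =====
-- stated objective: alternative
-- what changed: Replaces A's three separate scans (count, then index, or a backward negative-index while loop) by one forward pass that tracks the count, the first matching index and the last matching index simultaneously.
import Mathlib
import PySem

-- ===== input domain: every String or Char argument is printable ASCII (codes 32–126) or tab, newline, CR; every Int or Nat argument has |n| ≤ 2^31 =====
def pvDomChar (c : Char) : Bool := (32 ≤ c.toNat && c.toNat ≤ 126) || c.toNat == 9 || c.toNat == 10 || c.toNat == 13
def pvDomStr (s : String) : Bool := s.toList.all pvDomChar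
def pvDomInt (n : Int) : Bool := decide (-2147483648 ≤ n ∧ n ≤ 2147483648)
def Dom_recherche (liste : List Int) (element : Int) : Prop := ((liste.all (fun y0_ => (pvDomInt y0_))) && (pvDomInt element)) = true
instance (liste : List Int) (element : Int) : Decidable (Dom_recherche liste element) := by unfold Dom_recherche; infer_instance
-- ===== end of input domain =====

-- B replaces A's separate scans (count, then index or a backward while loop) by one forward pass
-- tracking count, first match and last match; equivalence is proved on all inputs.

-- ===== PORT A =====
-- the 'while liste[indice] != element: indice -= 1' loop; fuel = len(liste) is enough because the
-- loop is only entered when element occurs at least twice (so it stops before running off the list)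
def rechercheBack (liste : List Int) (element : Int) : Int → Nat → Int
  | indice, 0 => indice
  | indice, fuel + 1 =>
      match PySem.List.pyGet? liste indice with
      | some v => if v ≠ element then rechercheBack liste element (indice - 1) fuel else indice
      | none => indice  -- IndexError in Python; unreachable on the branch that calls this

def recherche (liste : List Int) (element : Int) : Int :=
  let nb : Int := PySem.List.count liste element
  if nb < 1 then (liste.length : Int)
  else if nb == 1 then ((PySem.List.index? liste element).getD 0 : Nat)
  else (liste.length : Int) + rechercheBack liste element (-1) liste.length

-- ===== PORT B =====
-- the for-loop of Source B: state (count, first, last)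
def rechercheLoop (element : Int) : List (Int × Int) → Int × Int × Int → Int × Int × Int
  | [], acc => acc
  | (i, x) :: rest, acc =>
      rechercheLoop element rest
        (if x = element then (acc.1 + 1, if acc.2.1 < 0 then i else acc.2.1, i) else acc)

def recherche_alt (liste : List Int) (element : Int) : Int :=
  let r := rechercheLoop element (PySem.List.enumerate liste 0) (0, -1, -1)
  if r.1 = 0 then (liste.length : Int)
  else if r.1 = 1 then r.2.1
  else r.2.2

-- ===== PRECONDITION & SPEC =====
def Spec_recherche (liste : List Int) (element : Int) (out : Int) : Prop := out = recherche_alt liste element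
instance (liste : List Int) (element : Int) (out : Int) : Decidable (Spec_recherche liste element out) := by unfold Spec_recherche; infer_instance

-- ===== CLAIM (what is proved, stated in full; the proofs are below) =====
def Claim_equal_recherche : Prop := ∀ (liste : List Int) (element : Int), Dom_recherche liste element → Spec_recherche liste element (recherche liste element)

-- ===== LEMMAS AND PROOFS =====

-- index of the LAST occurrence of e (meaningful when e ∈ l)
def lastIdx (e : Int) : List Int → Nat
  | [] => 0
  | _ :: xs => if e ∈ xs then lastIdx e xs + 1 else 0

theorem lastIdx_lt_length (e : Int) (l : List Int) (h : e ∈ l) : lastIdx e l < l.length := by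
  induction l with
  | nil => cases h
  | cons x xs ih =>
    simp only [lastIdx, List.length_cons]
    by_cases hx : e ∈ xs <;> simp [hx]
    exact ih hx

theorem lastIdx_getElem (e : Int) (l : List Int) (h : e ∈ l) :
    l[lastIdx e l]'(lastIdx_lt_length e l h) = e := by
  induction l with
  | nil => cases h
  | cons x xs ih =>
    by_cases hx : e ∈ xs
    · simpa [lastIdx, hx] using ih hx
    · have hex : e = x := by rcases List.mem_cons.mp h with h' | h'; exact h'; exact absurd h' hx
      subst hex
      simp [lastIdx, hx]

theorem lastIdx_after (e : Int) (l : List Int) (h : e ∈ l) (j : Nat) (hj : j < l.length)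
    (hgt : lastIdx e l < j) : l[j] ≠ e := by
  induction l generalizing j with
  | nil => cases h
  | cons x xs ih =>
    by_cases hx : e ∈ xs
    · simp only [lastIdx, hx, if_pos] at hgt
      match j, hj with
      | 0, _ => omega
      | j + 1, hj =>
        simp only [List.getElem_cons_succ]
        exact ih hx j (by simpa using hj) (by omega)
    · simp only [lastIdx, hx] at hgt
      match j, hj with
      | 0, _ => omega
      | j + 1, hj =>
        simp only [List.getElem_cons_succ]
        intro he; exact hx (he ▸ List.getElem_mem _)

theorem index?_of_mem (e : Int) (l : List Int) (h : e ∈ l) :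
    PySem.List.index? l e = some (l.idxOf e) := by
  induction l with
  | nil => cases h
  | cons x xs ih =>
    by_cases hx : x = e
    · subst hx; rw [PySem.List.index?_cons_self]; simp [List.idxOf_cons_self]
    · have hm : e ∈ xs := by rcases List.mem_cons.mp h with h' | h'; exact absurd h'.symm hx; exact h'
      rw [PySem.List.index?_cons_of_ne xs hx, ih hm]
      simp [hx]

-- B's loop when the element is absent: the accumulator is unchanged
theorem rechercheLoop_not_mem (e : Int) (l : List Int) (s : Int) (acc : Int × Int × Int)
    (h : e ∉ l) : rechercheLoop e (PySem.List.enumerate l s) acc = acc := by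
  induction l generalizing s with
  | nil => simp [PySem.List.enumerate_nil, rechercheLoop]
  | cons x xs ih =>
    have hx : x ≠ e := fun hh => h (hh ▸ List.mem_cons_self)
    simp only [PySem.List.enumerate_cons, rechercheLoop, if_neg (fun hh => hx hh)]
    exact ih _ (fun hm => h (List.mem_cons_of_mem _ hm))

-- B's loop when the element is present: count, first index, last index
theorem rechercheLoop_mem (e : Int) (l : List Int) (h : e ∈ l) :
    ∀ (s c f lst : Int), 0 ≤ s →
    rechercheLoop e (PySem.List.enumerate l s) (c, f, lst) =
      (c + (l.count e : Int), (if f < 0 then s + (l.idxOf e : Int) else f), s + (lastIdx e l : Int)) := by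
  induction l with
  | nil => cases h
  | cons x xs ih =>
    intro s c f lst hs
    simp only [PySem.List.enumerate_cons, rechercheLoop]
    by_cases hx : x = e
    · simp only [if_pos hx]
      by_cases hm : e ∈ xs
      · rw [ih hm (s + 1) _ _ _ (by omega)]
        simp only [Prod.mk.injEq]
        refine ⟨?_, ?_, ?_⟩
        · simp [hx]; ring
        · by_cases hf : f < 0
          · simp [hf, if_neg (by omega : ¬ s < 0), hx, List.idxOf_cons_self]
          · simp [hf]
        · simp [lastIdx, hm]; push_cast; ring  -- cast and reassociate
      · rw [rechercheLoop_not_mem e xs (s + 1) _ hm]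
        have hc0 : xs.count e = 0 := List.count_eq_zero.mpr hm
        simp only [Prod.mk.injEq]
        refine ⟨?_, ?_, ?_⟩
        · simp [hc0, hx]
        · by_cases hf : f < 0
          · simp [hf, if_neg (by omega : ¬ s < 0), hx]
          · simp [hf]
        · simp [lastIdx, hm]
    · have hm : e ∈ xs := by rcases List.mem_cons.mp h with h' | h'; exact absurd h'.symm hx; exact h'
      simp only [if_neg hx]
      rw [ih hm (s + 1) _ _ _ (by omega)]
      simp only [Prod.mk.injEq]
      refine ⟨?_, ?_, ?_⟩
      · simp [hx]
      · by_cases hf : f < 0 <;> simp [hf, hx] <;> omega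
      · simp [lastIdx, hm]; push_cast; ring  -- cast and reassociate

-- the backward while loop of A stops at the last occurrence
theorem rechercheBack_eq (e : Int) (l : List Int) (h : e ∈ l) :
    ∀ (fuel p : Nat), lastIdx e l ≤ p → p < l.length → p - lastIdx e l < fuel →
    rechercheBack l e ((p : Int) - l.length) fuel = (lastIdx e l : Int) - l.length := by
  intro fuel
  induction fuel with
  | zero => intro p _ _ hf; omega
  | succ fuel ih =>
    intro p hL hp hf
    have hk : (p : Int) - l.length = -(((l.length - p : Nat) : Int)) := by
      push_cast [Nat.cast_sub (le_of_lt hp)]; ring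
    have hget : PySem.List.pyGet? l ((p : Int) - l.length) = some l[p] := by
      rw [hk, PySem.List.pyGet?_neg_natCast _ _ (by omega) (by omega)]
      have he : l.length - (l.length - p) = p := by omega
      rw [he, List.getElem?_eq_getElem hp]
    rw [rechercheBack, hget]
    by_cases hpe : p = lastIdx e l
    · subst hpe
      simp [lastIdx_getElem e l h]
    · have hne : l[p] ≠ e := lastIdx_after e l h p hp (by omega)
      have hstep : (p : Int) - l.length - 1 = ((p - 1 : Nat) : Int) - l.length := by
        push_cast [Nat.cast_sub (by omega : 1 ≤ p)]; ring
      rw [hstep]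
      simp only [ne_eq, hne, not_false_eq_true, if_true]
      exact ih (p - 1) (by omega) (by omega) (by omega)

-- ===== VERDICT (by name: the statement is the Claim_ definition above) =====
theorem recherche_spec : Claim_equal_recherche := by
  intro liste element _
  unfold Spec_recherche recherche recherche_alt
  by_cases hm : element ∈ liste
  · rw [rechercheLoop_mem element liste hm 0 0 (-1) (-1) (le_refl 0)]
    have hc1 : 1 ≤ liste.count element := List.one_le_count_iff.mpr hm
    simp only [PySem.List.count_eq]
    by_cases hone : liste.count element = 1
    · rw [index?_of_mem element liste hm]
      simp [hone]
    · have hc2 : 2 ≤ liste.count element := by omega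
      have hlen : 1 ≤ liste.length := List.length_pos_of_mem hm
      have hback := rechercheBack_eq element liste hm liste.length (liste.length - 1)
        (by have := lastIdx_lt_length element liste hm; omega)
        (by omega)
        (by have : 0 ≤ lastIdx element liste := Nat.zero_le _; omega)
      have hm1 : ((liste.length - 1 : Nat) : Int) - liste.length = -1 := by
        push_cast [Nat.cast_sub hlen]; ring
      rw [hm1] at hback
      rw [hback]
      have h1 : ¬ ((liste.count element : Int) < 1) := by exact_mod_cast by omega
      have h2 : ¬ (((liste.count element : Int) == 1) = true) := by
        simp; exact_mod_cast by omega
      have h3 : ¬ ((0:Int) + (liste.count element : Int) = 0) := by exact_mod_cast by omega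
      have h4 : ¬ ((0:Int) + (liste.count element : Int) = 1) := by exact_mod_cast by omega
      simp only [if_neg h1, if_neg h2, if_neg h3, if_neg h4]
      ring
  · rw [rechercheLoop_not_mem element liste 0 _ hm]
    have hc : liste.count element = 0 := List.count_eq_zero.mpr hm
    simp [PySem.List.count_eq, hc]
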